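-- pv_equiv track=rewrite | github.com/Jonathan-Data/VCT-Match-Predictor | src/data_collection/rib_scraper.py | _calculate_current_streak
-- ===== SOURCE A (Python) =====
-- from typing import Dict, List, Any, Optional, Union
--
-- def _calculate_current_streak(recent_matches: List[Dict[str, Any]]) -> tuple[int, str]:
--     """Calculate current win/loss streak."""
--     if not recent_matches:
--         return 0, "none"
--
--     streak = 0
--     streak_type = "none"
--
--     for match in recent_matches:
--         result = match.get('result', '').lower()
--         if 'win' in result or 'w' == result:
--             if streak_type == "win" or streak_type == "none":
--                 streak += 1
--                 streak_type = "win"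
--             else:
--                 break
--         elif 'loss' in result or 'l' == result:
--             if streak_type == "loss" or streak_type == "none":
--                 streak += 1
--                 streak_type = "loss"
--             else:
--                 break
--         else:
--             break
--
--     return streak, streak_type
-- ===== SOURCE B (Python) =====
-- from typing import Dict, List, Any, Optional, Union
--
-- def _classify(match):
--     result = match.get('result', '').lower()
--     if 'win' in result or 'w' == result:
--         return "win"
--     if 'loss' in result or 'l' == result:
--         return "loss"
--     return "none"
--
-- def _calculate_current_streak(recent_matches: List[Dict[str, Any]]) -> tuple[int, str]:
--     """Classify every match first, then count the leading run of the first label."""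
--     if not recent_matches:
--         return 0, "none"
--     labels = [_classify(m) for m in recent_matches]
--     first = labels[0]
--     if first == "none":
--         return 0, "none"
--     count = next((i for i, t in enumerate(labels) if t != first), len(labels))
--     return count, first
-- ===== Notes on version B (the rewrite author's own statement) =====
-- stated objective: alternative
-- what changed: Replaces A's interleaved break-driven state machine (streak counter and streak type mutated inside one loop with breaks) by a classify-each-match map followed by a first-mismatch index scan over the label list.
import Mathlib
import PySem

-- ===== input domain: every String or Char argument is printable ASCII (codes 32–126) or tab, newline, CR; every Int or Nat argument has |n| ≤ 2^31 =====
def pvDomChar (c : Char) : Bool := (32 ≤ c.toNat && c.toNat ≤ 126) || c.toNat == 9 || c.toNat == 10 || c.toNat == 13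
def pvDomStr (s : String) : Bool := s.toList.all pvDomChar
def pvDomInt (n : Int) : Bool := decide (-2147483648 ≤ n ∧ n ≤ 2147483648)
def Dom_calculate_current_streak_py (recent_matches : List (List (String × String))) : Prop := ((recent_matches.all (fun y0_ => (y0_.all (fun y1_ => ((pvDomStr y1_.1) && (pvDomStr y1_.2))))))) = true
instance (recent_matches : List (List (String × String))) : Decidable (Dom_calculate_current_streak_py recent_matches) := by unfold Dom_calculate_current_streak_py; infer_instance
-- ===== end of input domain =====

-- B restructures A's break-driven single-loop state machine into classify-all-matches then
-- count the leading run of the first label (objective: alternative decomposition, same cost).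

-- ===== PORT A =====
-- the for-loop with its breaks, carrying the mutable (streak, streak_type) state
def pvLoopA : List (List (String × String)) → Int → String → Int × String
  | [], streak, streak_type => (streak, streak_type)
  | m :: rest, streak, streak_type =>
    let result := PySem.Str.lower (PySem.Dict.getD (PySem.Dict.mk m) "result" "")
    if PySem.Str.isIn "win" result || result == "w" then
      if streak_type == "win" || streak_type == "none" then
        pvLoopA rest (streak + 1) "win"
      else (streak, streak_type)        -- break
    else if PySem.Str.isIn "loss" result || result == "l" then
      if streak_type == "loss" || streak_type == "none" then
        pvLoopA rest (streak + 1) "loss"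
      else (streak, streak_type)        -- break
    else (streak, streak_type)          -- break

def calculate_current_streak_py (recent_matches : List (List (String × String))) : Int × String :=
  if recent_matches = [] then (0, "none")
  else pvLoopA recent_matches 0 "none"

-- ===== PORT B =====
def pvClassify (m : List (String × String)) : String :=
  let result := PySem.Str.lower (PySem.Dict.getD (PySem.Dict.mk m) "result" "")
  if PySem.Str.isIn "win" result || result == "w" then "win"
  else if PySem.Str.isIn "loss" result || result == "l" then "loss"
  else "none"

def calculate_current_streak_py_alt (recent_matches : List (List (String × String))) : Int × String :=
  if recent_matches = [] then (0, "none")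
  else
    let labels := recent_matches.map pvClassify
    let first := labels.headD "none"
    if first = "none" then (0, "none")
    else
      -- next((i for i, t in enumerate(labels) if t != first), len(labels))
      let count := (labels.findIdx? (fun t => t ≠ first)).getD labels.length
      ((count : Int), first)

-- ===== PRECONDITION & SPEC =====
def Spec_calculate_current_streak_py (recent_matches : List (List (String × String))) (out : Int × String) : Prop := out = calculate_current_streak_py_alt recent_matches
instance (recent_matches : List (List (String × String))) (out : Int × String) : Decidable (Spec_calculate_current_streak_py recent_matches out) := by unfold Spec_calculate_current_streak_py; infer_instance

-- ===== CLAIM (what is proved, stated in full; the proofs are below) =====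
def Claim_equal_calculate_current_streak_py : Prop := ∀ (recent_matches : List (List (String × String))), Dom_calculate_current_streak_py recent_matches → Spec_calculate_current_streak_py recent_matches (calculate_current_streak_py recent_matches)

-- ===== LEMMAS AND PROOFS =====

-- once the streak type is fixed to "win" or "loss", the loop just counts the
-- leading run of labels equal to it and returns with that type unchanged
theorem pvLoopA_run (t : String) (ht : t = "win" ∨ t = "loss") :
    ∀ (l : List (List (String × String))) (acc : Int),
      pvLoopA l acc t =
        (acc + (((l.map pvClassify).findIdx? (fun s => s ≠ t)).getD l.length : Int), t) := by
  intro l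
  induction l with
  | nil => intro acc; simp [pvLoopA]
  | cons m rest ih =>
    intro acc
    simp only [List.map_cons, List.findIdx?_cons, List.length_cons]
    by_cases hc : pvClassify m = t
    · have hpred : (decide (pvClassify m ≠ t)) = false := by simp [hc]
      rw [hpred]
      have hstep : pvLoopA (m :: rest) acc t = pvLoopA rest (acc + 1) t := by
        rcases ht with h | h <;>
        · subst h
          simp only [pvLoopA, pvClassify] at hc ⊢
          split_ifs at hc ⊢ <;> simp_all
      rw [hstep, ih]
      cases hfi : (rest.map pvClassify).findIdx? (fun s => s ≠ t) with
      | none => simp; ring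
      | some i => simp; ring
    · have hpred : (decide (pvClassify m ≠ t)) = true := by simp [hc]
      rw [hpred]
      have hstep : pvLoopA (m :: rest) acc t = (acc, t) := by
        rcases ht with h | h <;>
        · subst h
          simp only [pvLoopA, pvClassify] at hc ⊢
          split_ifs at hc ⊢ <;> simp_all
      rw [hstep]; simp

-- ===== VERDICT (by name: the statement is the Claim_ definition above) =====
set_option maxHeartbeats 1600000 in
theorem calculate_current_streak_py_spec : Claim_equal_calculate_current_streak_py := by
  intro rm _
  unfold Spec_calculate_current_streak_py calculate_current_streak_py calculate_current_streak_py_alt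
  cases rm with
  | nil => simp
  | cons m rest =>
    simp only [if_neg (List.cons_ne_nil m rest), List.map_cons, List.headD_cons,
      List.findIdx?_cons, List.length_cons]
    by_cases hw : pvClassify m = "win"
    · have h1 : pvLoopA (m :: rest) 0 "none" = pvLoopA rest 1 "win" := by
        simp only [pvLoopA, pvClassify] at hw ⊢
        split_ifs at hw ⊢ <;> simp_all
      rw [h1, pvLoopA_run "win" (Or.inl rfl)]
      simp only [hw]
      simp only [if_neg (by decide : ¬ ("win" : String) = "none")]
      have : (decide (("win" : String) ≠ "win")) = false := by decide
      rw [this]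
      cases hfi : (rest.map pvClassify).findIdx? (fun s => s ≠ "win") with
      | none => simp; ring
      | some i => simp; ring
    · by_cases hl : pvClassify m = "loss"
      · have h1 : pvLoopA (m :: rest) 0 "none" = pvLoopA rest 1 "loss" := by
          simp only [pvLoopA, pvClassify] at hw hl ⊢
          split_ifs at hl ⊢ <;> simp_all
        rw [h1, pvLoopA_run "loss" (Or.inr rfl)]
        simp only [hl]
        simp only [if_neg (by decide : ¬ ("loss" : String) = "none")]
        have : (decide (("loss" : String) ≠ "loss")) = false := by decide
        rw [this]
        cases hfi : (rest.map pvClassify).findIdx? (fun s => s ≠ "loss") with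
        | none => simp; ring
        | some i => simp; ring
      · have hn : pvClassify m = "none" := by
          simp only [pvClassify] at hw hl ⊢
          split_ifs at * <;> simp_all
        have h1 : pvLoopA (m :: rest) 0 "none" = (0, "none") := by
          simp only [pvLoopA, pvClassify] at hn ⊢
          split_ifs at hn ⊢ <;> simp_all
        rw [h1]; simp only [hn]
        simp
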